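-- pv_equiv track=rewrite | github.com/coding-mynd/adventofcode | 2025/day3/day3.py | part_one
-- ===== SOURCE A (Python) =====
-- def part_one(lines):
--     '''find the largest two digit number in the line'''
--     total = 0
--     for line in lines:
--         high_index = get_highest_index(line[:len(line)-1])
--         sub_str = line[high_index+1:]
--         next_index = get_highest_index(sub_str)
--         num = line[high_index] + sub_str[next_index]
--         total += int(num)
--     return total
--
-- def get_highest_index(num_str):
--     for i in range(9,-1,-1):
--         find_str = str(i)
--         if find_str in num_str:
--             return num_str.index(find_str)
-- ===== SOURCE B (Python) =====
-- def part_one(lines):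
--     '''find the largest two digit number in the line'''
--     return sum(_line_value(line) for line in lines)
--
-- def _line_value(line):
--     i, c = _max_digit(line[:-1])
--     _, d = _max_digit(line[i + 1:])
--     return 10 * (ord(c) - 48) + (ord(d) - 48)
--
-- def _max_digit(s):
--     '''(index, char) of the largest digit in s, first occurrence on ties; None if no digit'''
--     best = None
--     for idx, ch in enumerate(s):
--         if '0' <= ch <= '9' and (best is None or best[1] < ch):
--             best = (idx, ch)
--     return best
-- ===== Notes on version B (the rewrite author's own statement) =====
-- stated objective: alternative
-- what changed: Each digit search is replaced: instead of up to ten descending substring scans ('9'..'0' via `in` plus `.index`) per search, B makes one linear pass tracking the largest digit and its first occurrence index, and sums per-line two-digit values arithmetically via a generator expression.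
import Mathlib
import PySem

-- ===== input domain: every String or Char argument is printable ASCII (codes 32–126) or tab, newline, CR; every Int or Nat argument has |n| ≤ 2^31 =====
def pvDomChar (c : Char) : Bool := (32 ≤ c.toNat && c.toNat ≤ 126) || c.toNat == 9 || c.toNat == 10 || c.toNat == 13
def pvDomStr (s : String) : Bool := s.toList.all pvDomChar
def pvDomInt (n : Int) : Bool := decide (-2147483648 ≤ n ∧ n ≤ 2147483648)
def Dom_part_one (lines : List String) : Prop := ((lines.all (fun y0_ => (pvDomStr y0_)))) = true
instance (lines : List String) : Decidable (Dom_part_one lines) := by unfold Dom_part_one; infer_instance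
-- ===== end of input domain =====

-- B replaces A's ten descending substring scans per search (`str(i) in s` / `s.index`) by a single
-- linear pass tracking the largest digit and its first index, and sums per-line values arithmetically.

-- ===== PORT A =====
-- for i in range(9,-1,-1): if str(i) in num_str: return num_str.index(find_str)
def ghiLoop (cs : List Char) : List Int → Option Int
  | [] => none
  | i :: rest =>
    let fs := PySem.Int.toChars i
    if PySem.Chars.isIn fs cs then some (PySem.Chars.find cs fs) else ghiLoop cs rest

def getHighestIndex (cs : List Char) : Option Int :=
  ghiLoop cs (PySem.List.pyRange 9 (-1) (-1))

def part_one (lines : List String) : Int :=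
  lines.foldl (fun total line =>
    let cs := line.toList
    match getHighestIndex (PySem.List.slice cs none (some ((cs.length : Int) - 1))) with
    | none => total   -- Python raises TypeError (None + 1) here; excluded by Pre_
    | some h =>
      let sub := PySem.List.slice cs (some (h + 1)) none
      match getHighestIndex sub with
      | none => total -- Python raises TypeError (sub_str[None]) here; excluded by Pre_
      | some n =>
        match PySem.List.pyGet? cs h, PySem.List.pyGet? sub n with
        | some c1, some c2 => total + (PySem.Int.ofChars? [c1, c2]).getD 0
        | _, _ => total) 0

-- ===== PORT B =====
-- one pass: best = (first index, char) of the largest digit seen so far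
def digitStep (best : Option (Int × Char)) (p : Int × Char) : Option (Int × Char) :=
  if ('0' ≤ p.2 && p.2 ≤ '9') && (match best with | none => true | some b => decide (b.2 < p.2)) then
    some p
  else best

def maxDigit (cs : List Char) : Option (Int × Char) :=
  (PySem.List.enumerate cs 0).foldl digitStep none

def lineValue (line : String) : Int :=
  let cs := line.toList
  match maxDigit (PySem.List.slice cs none (some (-1))) with
  | none => 0  -- Python raises TypeError (unpacking None) here; excluded by Pre_
  | some (i, c) =>
    match maxDigit (PySem.List.slice cs (some (i + 1)) none) with
    | none => 0  -- Python raises TypeError here; excluded by Pre_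
    | some (_, d) => 10 * ((c.toNat : Int) - 48) + ((d.toNat : Int) - 48)

def part_one_alt (lines : List String) : Int :=
  (lines.map lineValue).sum

-- ===== PRECONDITION & SPEC =====
def chNum (c : Char) : Bool := 47 < c.toNat && c.toNat < 58

-- okLine: the prefix line[:-1] contains a digit (h = first occurrence of its largest digit) and
-- a digit occurs after position h; exactly when Python A returns on the line (else: TypeError).
def okLine (line : String) : Prop :=
  ∃ h < line.toList.length, h + 1 < line.toList.length ∧
    chNum (line.toList[h]!) = true ∧
    (∀ j < line.toList.length, j + 1 < line.toList.length →
      chNum (line.toList[j]!) = true →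
      line.toList[j]! ≤ line.toList[h]!) ∧
    (∀ j < h, chNum (line.toList[j]!) = true →
      line.toList[j]! < line.toList[h]!) ∧
    (∃ k < line.toList.length, h < k ∧ chNum (line.toList[k]!) = true)

-- Pre_ excludes exactly the inputs on which Python A raises TypeError (a line whose line[:-1] has no
-- digit, or with no digit after the first occurrence of the highest digit of line[:-1]).
def Pre_part_one (lines : List String) : Prop := ∀ line ∈ lines, okLine line
instance (lines : List String) : Decidable (Pre_part_one lines) := by
  unfold Pre_part_one okLine; infer_instance

def pvWitness_part_one : List String := ["12", "x93z7."]

def Spec_part_one (lines : List String) (out : Int) : Prop := out = part_one_alt lines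
instance (lines : List String) (out : Int) : Decidable (Spec_part_one lines out) := by
  unfold Spec_part_one; infer_instance

-- ===== CLAIM (what is proved, stated in full; the proofs are below) =====
def Claim_equal_part_one : Prop := ∀ (lines : List String), Dom_part_one lines → Pre_part_one lines → Spec_part_one lines (part_one lines)

-- ===== LEMMAS AND PROOFS =====

-- the canonical characterisation both helpers satisfy: i is the first index of the largest digit of cs
def FirstMax (cs : List Char) (i : Int) (c : Char) : Prop :=
  ∃ h : Nat, i = (h : Int) ∧ h < cs.length ∧ cs.getD h ' ' = c ∧ chNum c = true ∧
    (∀ j < cs.length, chNum (cs.getD j ' ') = true → cs.getD j ' ' ≤ c) ∧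
    (∀ j < h, chNum (cs.getD j ' ') = true → cs.getD j ' ' < c)

theorem digit_cases (c : Char) (h : chNum c = true) :
    c = '0' ∨ c = '1' ∨ c = '2' ∨ c = '3' ∨ c = '4' ∨ c = '5' ∨ c = '6' ∨ c = '7' ∨ c = '8' ∨ c = '9' := by
  simp only [chNum, Bool.and_eq_true, decide_eq_true_eq, Char.toNat] at h
  obtain ⟨a, b⟩ := h
  have hv : c.val.toNat = 48 ∨ c.val.toNat = 49 ∨ c.val.toNat = 50 ∨ c.val.toNat = 51 ∨ c.val.toNat = 52 ∨ c.val.toNat = 53 ∨ c.val.toNat = 54 ∨ c.val.toNat = 55 ∨ c.val.toNat = 56 ∨ c.val.toNat = 57 := by omega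
  rcases hv with h|h|h|h|h|h|h|h|h|h
  · exact Or.inl (Char.ext (UInt32.toNat_inj.mp h))
  · exact Or.inr (Or.inl (Char.ext (UInt32.toNat_inj.mp h)))
  · exact Or.inr (Or.inr (Or.inl (Char.ext (UInt32.toNat_inj.mp h))))
  · exact Or.inr (Or.inr (Or.inr (Or.inl (Char.ext (UInt32.toNat_inj.mp h)))))
  · exact Or.inr (Or.inr (Or.inr (Or.inr (Or.inl (Char.ext (UInt32.toNat_inj.mp h))))))
  · exact Or.inr (Or.inr (Or.inr (Or.inr (Or.inr (Or.inl (Char.ext (UInt32.toNat_inj.mp h)))))))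
  · exact Or.inr (Or.inr (Or.inr (Or.inr (Or.inr (Or.inr (Or.inl (Char.ext (UInt32.toNat_inj.mp h))))))))
  · exact Or.inr (Or.inr (Or.inr (Or.inr (Or.inr (Or.inr (Or.inr (Or.inl (Char.ext (UInt32.toNat_inj.mp h)))))))))
  · exact Or.inr (Or.inr (Or.inr (Or.inr (Or.inr (Or.inr (Or.inr (Or.inr (Or.inl (Char.ext (UInt32.toNat_inj.mp h))))))))))
  · exact Or.inr (Or.inr (Or.inr (Or.inr (Or.inr (Or.inr (Or.inr (Or.inr (Or.inr (Char.ext (UInt32.toNat_inj.mp h))))))))))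

theorem find_go_single (d : Char) : ∀ (cs : List Char) (k : Nat),
    PySem.Chars.find.go [d] cs k = if d ∈ cs then ((k : Int) + cs.idxOf d) else -1
  | [], k => by simp [PySem.Chars.find.go]
  | c :: t, k => by
    rw [PySem.Chars.find.go]
    by_cases hc : c = d
    · subst hc
      simp [List.isPrefixOf]
    · have h1 : ([d].isPrefixOf (c :: t)) = false := by
        simp [List.isPrefixOf, Ne.symm hc]
      rw [h1]
      simp only [Bool.false_eq_true, if_false]
      rw [find_go_single d t (k + 1)]
      by_cases hm : d ∈ t
      · simp [hm, hc, Ne.symm hc]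
        push_cast
        ring
      · simp [hm, hc, Ne.symm hc]

theorem find_single (cs : List Char) (d : Char) :
    PySem.Chars.find cs [d] = if d ∈ cs then (cs.idxOf d : Int) else -1 := by
  rw [PySem.Chars.find, find_go_single]
  simp

theorem isIn_single (cs : List Char) (d : Char) :
    PySem.Chars.isIn [d] cs = decide (d ∈ cs) := by
  rw [PySem.Chars.isIn, find_single]
  by_cases hm : d ∈ cs <;> simp [hm]

theorem idxOf_eq_of_first (c : Char) : ∀ (cs : List Char) (h : Nat), h < cs.length →
    cs.getD h ' ' = c → (∀ j, j < h → cs.getD j ' ' ≠ c) → cs.idxOf c = h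
  | [], h, hlen, _, _ => by simp at hlen
  | x :: t, 0, hlen, hc, _ => by
    simp at hc; simp [hc]
  | x :: t, h + 1, hlen, hc, hb => by
    have hx : x ≠ c := by
      have := hb 0 (by omega); simpa using this
    simp [hx]
    exact idxOf_eq_of_first c t h (by simpa using hlen) (by simpa using hc)
      (fun j hj => by have := hb (j + 1) (by omega); simpa using this)

theorem ghi_finds (cs : List Char) (c : Char) (hdig : chNum c = true) (hmem : c ∈ cs)
    (hnot : ∀ e, chNum e = true → c < e → e ∉ cs) :
    getHighestIndex cs = some (cs.idxOf c : Int) := by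
  have hr : PySem.List.pyRange 9 (-1) (-1) = [9,8,7,6,5,4,3,2,1,0] := by decide
  have t9 : PySem.Int.toChars 9 = ['9'] := by decide
  have t8 : PySem.Int.toChars 8 = ['8'] := by decide
  have t7 : PySem.Int.toChars 7 = ['7'] := by decide
  have t6 : PySem.Int.toChars 6 = ['6'] := by decide
  have t5 : PySem.Int.toChars 5 = ['5'] := by decide
  have t4 : PySem.Int.toChars 4 = ['4'] := by decide
  have t3 : PySem.Int.toChars 3 = ['3'] := by decide
  have t2 : PySem.Int.toChars 2 = ['2'] := by decide
  have t1 : PySem.Int.toChars 1 = ['1'] := by decide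
  have t0 : PySem.Int.toChars 0 = ['0'] := by decide
  have hcases := digit_cases c hdig
  rcases hcases with rfl|rfl|rfl|rfl|rfl|rfl|rfl|rfl|rfl|rfl
  ·
    have n1 : ('1' : Char) ∉ cs := hnot '1' (by decide) (by decide)
    have n2 : ('2' : Char) ∉ cs := hnot '2' (by decide) (by decide)
    have n3 : ('3' : Char) ∉ cs := hnot '3' (by decide) (by decide)
    have n4 : ('4' : Char) ∉ cs := hnot '4' (by decide) (by decide)
    have n5 : ('5' : Char) ∉ cs := hnot '5' (by decide) (by decide)
    have n6 : ('6' : Char) ∉ cs := hnot '6' (by decide) (by decide)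
    have n7 : ('7' : Char) ∉ cs := hnot '7' (by decide) (by decide)
    have n8 : ('8' : Char) ∉ cs := hnot '8' (by decide) (by decide)
    have n9 : ('9' : Char) ∉ cs := hnot '9' (by decide) (by decide)
    simp only [getHighestIndex, hr, ghiLoop, t9, t8, t7, t6, t5, t4, t3, t2, t1, t0, isIn_single, find_single]
    simp [n1, n2, n3, n4, n5, n6, n7, n8, n9, hmem]
  ·
    have n2 : ('2' : Char) ∉ cs := hnot '2' (by decide) (by decide)
    have n3 : ('3' : Char) ∉ cs := hnot '3' (by decide) (by decide)
    have n4 : ('4' : Char) ∉ cs := hnot '4' (by decide) (by decide)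
    have n5 : ('5' : Char) ∉ cs := hnot '5' (by decide) (by decide)
    have n6 : ('6' : Char) ∉ cs := hnot '6' (by decide) (by decide)
    have n7 : ('7' : Char) ∉ cs := hnot '7' (by decide) (by decide)
    have n8 : ('8' : Char) ∉ cs := hnot '8' (by decide) (by decide)
    have n9 : ('9' : Char) ∉ cs := hnot '9' (by decide) (by decide)
    simp only [getHighestIndex, hr, ghiLoop, t9, t8, t7, t6, t5, t4, t3, t2, t1, t0, isIn_single, find_single]
    simp [n2, n3, n4, n5, n6, n7, n8, n9, hmem]
  ·
    have n3 : ('3' : Char) ∉ cs := hnot '3' (by decide) (by decide)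
    have n4 : ('4' : Char) ∉ cs := hnot '4' (by decide) (by decide)
    have n5 : ('5' : Char) ∉ cs := hnot '5' (by decide) (by decide)
    have n6 : ('6' : Char) ∉ cs := hnot '6' (by decide) (by decide)
    have n7 : ('7' : Char) ∉ cs := hnot '7' (by decide) (by decide)
    have n8 : ('8' : Char) ∉ cs := hnot '8' (by decide) (by decide)
    have n9 : ('9' : Char) ∉ cs := hnot '9' (by decide) (by decide)
    simp only [getHighestIndex, hr, ghiLoop, t9, t8, t7, t6, t5, t4, t3, t2, t1, t0, isIn_single, find_single]
    simp [n3, n4, n5, n6, n7, n8, n9, hmem]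
  ·
    have n4 : ('4' : Char) ∉ cs := hnot '4' (by decide) (by decide)
    have n5 : ('5' : Char) ∉ cs := hnot '5' (by decide) (by decide)
    have n6 : ('6' : Char) ∉ cs := hnot '6' (by decide) (by decide)
    have n7 : ('7' : Char) ∉ cs := hnot '7' (by decide) (by decide)
    have n8 : ('8' : Char) ∉ cs := hnot '8' (by decide) (by decide)
    have n9 : ('9' : Char) ∉ cs := hnot '9' (by decide) (by decide)
    simp only [getHighestIndex, hr, ghiLoop, t9, t8, t7, t6, t5, t4, t3, t2, t1, t0, isIn_single, find_single]
    simp [n4, n5, n6, n7, n8, n9, hmem]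
  ·
    have n5 : ('5' : Char) ∉ cs := hnot '5' (by decide) (by decide)
    have n6 : ('6' : Char) ∉ cs := hnot '6' (by decide) (by decide)
    have n7 : ('7' : Char) ∉ cs := hnot '7' (by decide) (by decide)
    have n8 : ('8' : Char) ∉ cs := hnot '8' (by decide) (by decide)
    have n9 : ('9' : Char) ∉ cs := hnot '9' (by decide) (by decide)
    simp only [getHighestIndex, hr, ghiLoop, t9, t8, t7, t6, t5, t4, t3, t2, t1, t0, isIn_single, find_single]
    simp [n5, n6, n7, n8, n9, hmem]
  ·
    have n6 : ('6' : Char) ∉ cs := hnot '6' (by decide) (by decide)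
    have n7 : ('7' : Char) ∉ cs := hnot '7' (by decide) (by decide)
    have n8 : ('8' : Char) ∉ cs := hnot '8' (by decide) (by decide)
    have n9 : ('9' : Char) ∉ cs := hnot '9' (by decide) (by decide)
    simp only [getHighestIndex, hr, ghiLoop, t9, t8, t7, t6, t5, t4, t3, t2, t1, t0, isIn_single, find_single]
    simp [n6, n7, n8, n9, hmem]
  ·
    have n7 : ('7' : Char) ∉ cs := hnot '7' (by decide) (by decide)
    have n8 : ('8' : Char) ∉ cs := hnot '8' (by decide) (by decide)
    have n9 : ('9' : Char) ∉ cs := hnot '9' (by decide) (by decide)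
    simp only [getHighestIndex, hr, ghiLoop, t9, t8, t7, t6, t5, t4, t3, t2, t1, t0, isIn_single, find_single]
    simp [n7, n8, n9, hmem]
  ·
    have n8 : ('8' : Char) ∉ cs := hnot '8' (by decide) (by decide)
    have n9 : ('9' : Char) ∉ cs := hnot '9' (by decide) (by decide)
    simp only [getHighestIndex, hr, ghiLoop, t9, t8, t7, t6, t5, t4, t3, t2, t1, t0, isIn_single, find_single]
    simp [n8, n9, hmem]
  ·
    have n9 : ('9' : Char) ∉ cs := hnot '9' (by decide) (by decide)
    simp only [getHighestIndex, hr, ghiLoop, t9, t8, t7, t6, t5, t4, t3, t2, t1, t0, isIn_single, find_single]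
    simp [n9, hmem]
  ·

    simp only [getHighestIndex, hr, ghiLoop, t9, t8, t7, t6, t5, t4, t3, t2, t1, t0, isIn_single, find_single]
    simp [ hmem]

theorem A_of_FirstMax (cs : List Char) (i : Int) (c : Char) (hP : FirstMax cs i c) :
    getHighestIndex cs = some i := by
  obtain ⟨h, rfl, hlen, hch, hdig, hmax, hfirst⟩ := hP
  have hget : cs.getD h ' ' = cs[h]'hlen := List.getD_eq_getElem cs ' ' hlen
  have hmem : c ∈ cs := by
    rw [← hch, hget]; exact List.getElem_mem hlen
  have hnot : ∀ e, chNum e = true → c < e → e ∉ cs := by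
    intro e hd hl hmm
    obtain ⟨j, hj, hje⟩ := List.mem_iff_getElem.mp hmm
    have := hmax j hj (by rw [List.getD_eq_getElem cs ' ' hj, hje]; exact hd)
    rw [List.getD_eq_getElem cs ' ' hj, hje] at this
    exact absurd hl (not_lt.mpr this)
  rw [ghi_finds cs c hdig hmem hnot]
  congr 1
  exact_mod_cast idxOf_eq_of_first c cs h hlen hch (fun j hj he => by
    have hjlen : j < cs.length := by omega
    have hd : chNum (cs.getD j ' ') = true := by rw [he]; exact hdig
    exact absurd (hfirst j hj hd) (by rw [he]; exact lt_irrefl c))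

theorem A_none (cs : List Char) (h : ∀ x ∈ cs, chNum x = false) :
    getHighestIndex cs = none := by
  have hn : ∀ d : Char, chNum d = true → d ∉ cs := by
    intro d hd hmem
    rw [h d hmem] at hd; exact Bool.false_ne_true hd
  have hr : PySem.List.pyRange 9 (-1) (-1) = [9,8,7,6,5,4,3,2,1,0] := by decide
  have t9 : PySem.Int.toChars 9 = ['9'] := by decide
  have t8 : PySem.Int.toChars 8 = ['8'] := by decide
  have t7 : PySem.Int.toChars 7 = ['7'] := by decide
  have t6 : PySem.Int.toChars 6 = ['6'] := by decide
  have t5 : PySem.Int.toChars 5 = ['5'] := by decide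
  have t4 : PySem.Int.toChars 4 = ['4'] := by decide
  have t3 : PySem.Int.toChars 3 = ['3'] := by decide
  have t2 : PySem.Int.toChars 2 = ['2'] := by decide
  have t1 : PySem.Int.toChars 1 = ['1'] := by decide
  have t0 : PySem.Int.toChars 0 = ['0'] := by decide
  simp only [getHighestIndex, hr, ghiLoop, t9, t8, t7, t6, t5, t4, t3, t2, t1, t0, isIn_single]
  simp [hn '9' (by decide), hn '8' (by decide), hn '7' (by decide), hn '6' (by decide),
    hn '5' (by decide), hn '4' (by decide), hn '3' (by decide), hn '2' (by decide),
    hn '1' (by decide), hn '0' (by decide)]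

theorem digit_eq (c : Char) : ('0' ≤ c && c ≤ '9') = chNum c := by
  apply Bool.eq_iff_iff.mpr
  simp only [chNum, Bool.and_eq_true, decide_eq_true_eq, Char.le_def,
    UInt32.le_iff_toNat_le, Char.toNat]
  have h0 : '0'.val.toNat = 48 := rfl
  have h9 : '9'.val.toNat = 57 := rfl
  rw [h0, h9]
  omega

theorem digitStep_none (p : Int × Char) :
    digitStep none p = if chNum p.2 = true then some p else none := by
  simp [digitStep, digit_eq]

theorem digitStep_some (b p : Int × Char) :
    digitStep (some b) p = if (chNum p.2 && decide (b.2 < p.2)) = true then some p else some b := by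
  simp [digitStep, digit_eq]

theorem FM_extend (cs : List Char) (x : Char) (i : Int) (c : Char)
    (hFM : FirstMax cs i c) (hx : chNum x = true → x ≤ c) : FirstMax (cs ++ [x]) i c := by
  obtain ⟨h, hie, hlen, hch, hdig, hmax, hfirst⟩ := hFM
  have hgetx : (cs ++ [x]).getD cs.length ' ' = x := by simp
  have hgetl : ∀ j, j < cs.length → (cs ++ [x]).getD j ' ' = cs.getD j ' ' := by
    intro j hj; rw [List.getD_append _ _ _ _ hj]
  refine ⟨h, hie, by simp; omega, by rw [← hch]; exact hgetl h hlen, hdig, ?_, ?_⟩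
  · intro j hj hd
    simp at hj
    rcases Nat.lt_or_ge j cs.length with hlt | hge
    · rw [hgetl j hlt] at hd ⊢; exact hmax j hlt hd
    · have hj' : j = cs.length := by omega
      subst hj'; rw [hgetx] at hd ⊢; exact hx hd
  · intro j hj hd
    rw [hgetl j (by omega)] at hd ⊢
    exact hfirst j hj hd

theorem B_char (cs : List Char) :
    (maxDigit cs = none ∧ ∀ x ∈ cs, chNum x = false) ∨
    (∃ i c, maxDigit cs = some (i, c) ∧ FirstMax cs i c) := by
  induction cs using List.reverseRecOn with
  | nil => left; constructor <;> simp [maxDigit]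
  | append_singleton cs x ih =>
    have hstep : maxDigit (cs ++ [x]) = digitStep (maxDigit cs) ((cs.length : Int), x) := by
      rw [maxDigit, PySem.List.enumerate_append]
      simp [maxDigit, PySem.List.enumerate, List.foldl_append]
    have hgetx : (cs ++ [x]).getD cs.length ' ' = x := by simp
    have hgetl : ∀ j, j < cs.length → (cs ++ [x]).getD j ' ' = cs.getD j ' ' := by
      intro j hj; rw [List.getD_append _ _ _ _ hj]
    have hmemD : ∀ j, j < cs.length → cs.getD j ' ' ∈ cs := by
      intro j hj
      rw [List.getD_eq_getElem cs ' ' hj]; exact List.getElem_mem hj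
    rcases ih with ⟨hnone, hnd⟩ | ⟨i, c, hsome, hFM⟩
    · rw [hnone, digitStep_none] at hstep
      by_cases hdx : chNum x = true
      · right
        rw [if_pos hdx] at hstep
        refine ⟨(cs.length : Int), x, hstep, cs.length, rfl, by simp, hgetx, hdx, ?_, ?_⟩
        · intro j hj hd
          simp at hj
          rcases Nat.lt_or_ge j cs.length with hlt | hge
          · rw [hgetl j hlt, hnd _ (hmemD j hlt)] at hd
            exact absurd hd (by simp)
          · have hj' : j = cs.length := by omega
            subst hj'; rw [hgetx]
        · intro j hj hd
          rw [hgetl j hj, hnd _ (hmemD j hj)] at hd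
          exact absurd hd (by simp)
      · left
        refine ⟨by rw [hstep, if_neg hdx], ?_⟩
        intro y hy
        rcases List.mem_append.mp hy with hy | hy
        · exact hnd y hy
        · simp at hy; subst hy
          exact Bool.eq_false_iff.mpr hdx
    · rw [hsome, digitStep_some] at hstep
      by_cases hdx : chNum x = true
      · by_cases hcx : c < x
        · right
          obtain ⟨h, hie, hlen, hch, hdig, hmax, hfirst⟩ := hFM
          rw [if_pos (by simp [hdx, hcx])] at hstep
          refine ⟨(cs.length : Int), x, hstep, cs.length, rfl, by simp, hgetx, hdx, ?_, ?_⟩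
          · intro j hj hd
            simp at hj
            rcases Nat.lt_or_ge j cs.length with hlt | hge
            · rw [hgetl j hlt] at hd ⊢
              exact le_of_lt (lt_of_le_of_lt (hmax j hlt hd) hcx)
            · have hj' : j = cs.length := by omega
              subst hj'; rw [hgetx]
          · intro j hj hd
            rw [hgetl j hj] at hd ⊢
            exact lt_of_le_of_lt (hmax j hj hd) hcx
        · right
          rw [if_neg (by simp [hcx])] at hstep
          exact ⟨i, c, hstep, FM_extend cs x i c hFM (fun _ => not_lt.mp hcx)⟩
      · right
        rw [if_neg (by simp [hdx])] at hstep
        exact ⟨i, c, hstep, FM_extend cs x i c hFM (fun hd => absurd hd hdx)⟩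

theorem FirstMax_unique (cs : List Char) (i i' : Int) (c c' : Char)
    (h : FirstMax cs i c) (h' : FirstMax cs i' c') : i = i' ∧ c = c' := by
  obtain ⟨a, rfl, halen, hach, hadig, hamax, hafirst⟩ := h
  obtain ⟨b, rfl, hblen, hbch, hbdig, hbmax, hbfirst⟩ := h'
  have hcc : c = c' := by
    have h1 : c ≤ c' := by
      have := hbmax a halen (by rw [hach]; exact hadig)
      rwa [hach] at this
    have h2 : c' ≤ c := by
      have := hamax b hblen (by rw [hbch]; exact hbdig)
      rwa [hbch] at this
    exact le_antisymm h1 h2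
  subst hcc
  have hab : a = b := by
    rcases Nat.lt_trichotomy a b with hlt | heq | hgt
    · have := hbfirst a hlt (by rw [hach]; exact hadig)
      rw [hach] at this; exact absurd this (lt_irrefl c)
    · exact heq
    · have := hafirst b hgt (by rw [hbch]; exact hbdig)
      rw [hbch] at this; exact absurd this (lt_irrefl c)
  simp [hab]

theorem main_eq (cs : List Char) :
    getHighestIndex cs = (maxDigit cs).map (fun p => p.1) := by
  rcases B_char cs with ⟨hnone, hnd⟩ | ⟨i, c, hsome, hFM⟩
  · rw [hnone, A_none cs hnd]; rfl
  · rw [hsome, A_of_FirstMax cs i c hFM]; rfl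

theorem ofChars_digits (a b : Char) (ha : chNum a = true) (hb : chNum b = true) :
    PySem.Int.ofChars? [a, b] = some (10 * ((a.toNat : Int) - 48) + ((b.toNat : Int) - 48)) := by
  rcases digit_cases a ha with rfl|rfl|rfl|rfl|rfl|rfl|rfl|rfl|rfl|rfl <;>
    rcases digit_cases b hb with rfl|rfl|rfl|rfl|rfl|rfl|rfl|rfl|rfl|rfl <;> decide

theorem getD_dropLast (cs : List Char) (j : Nat) (hj : j < cs.length - 1) :
    cs.dropLast.getD j ' ' = cs.getD j ' ' := by
  have h1 : j < cs.dropLast.length := by simp; omega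
  have h2 : j < cs.length := by omega
  rw [List.getD_eq_getElem _ ' ' h1, List.getD_eq_getElem _ ' ' h2, List.getElem_dropLast]

theorem getD_drop (cs : List Char) (a j : Nat) (hj : a + j < cs.length) :
    (cs.drop a).getD j ' ' = cs.getD (a + j) ' ' := by
  have h1 : j < (cs.drop a).length := by simp; omega
  rw [List.getD_eq_getElem _ ' ' h1, List.getD_eq_getElem _ ' ' hj, List.getElem_drop]

theorem per_line (total : Int) (line : String) (hok : okLine line) :
    (match getHighestIndex (PySem.List.slice line.toList none (some ((line.toList.length : Int) - 1))) with
    | none => total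
    | some h =>
      match getHighestIndex (PySem.List.slice line.toList (some (h + 1)) none) with
      | none => total
      | some n =>
        match PySem.List.pyGet? line.toList h, PySem.List.pyGet? (PySem.List.slice line.toList (some (h + 1)) none) n with
        | some c1, some c2 => total + (PySem.Int.ofChars? [c1, c2]).getD 0
        | _, _ => total) = total + lineValue line := by
  obtain ⟨h, hh, hlen2, hdig0, hmax0, hfirst0, k, hk, hkh, hkdig0⟩ := hok
  have hlen : 2 ≤ line.toList.length := by omega
  set cs := line.toList with hcs
  have getBang : ∀ (j : Nat), j < cs.length → cs[j]! = cs.getD j ' ' := by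
    intro j hj
    rw [List.getElem!_eq_getElem?_getD, List.getElem?_eq_getElem hj, List.getD_eq_getElem cs ' ' hj]
    rfl
  have hdig : chNum (cs.getD h ' ') = true := by rwa [getBang h hh] at hdig0
  have hmax : ∀ j, j < cs.length → j + 1 < cs.length →
      chNum (cs.getD j ' ') = true → cs.getD j ' ' ≤ cs.getD h ' ' := by
    intro j h1 h2 hd
    have := hmax0 j h1 h2 (by rwa [getBang j h1])
    rwa [getBang j h1, getBang h hh] at this
  have hfirst : ∀ j, j < h → chNum (cs.getD j ' ') = true → cs.getD j ' ' < cs.getD h ' ' := by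
    intro j h1 hd
    have hjlen : j < cs.length := by omega
    have := hfirst0 j h1 (by rwa [getBang j hjlen])
    rwa [getBang j hjlen, getBang h hh] at this
  have hkdig : chNum (cs.getD k ' ') = true := by rwa [getBang k hk] at hkdig0
  -- the two prefix slices are both cs.dropLast
  have hPA : PySem.List.slice cs none (some ((cs.length : Int) - 1)) = cs.dropLast := by
    have he : ((cs.length : Int) - 1) = ((cs.length - 1 : Nat) : Int) := by push_cast [Nat.cast_sub (by omega : 1 ≤ cs.length)]; ring
    rw [he, PySem.List.slice_to_natCast, ← List.dropLast_eq_take]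
  have hPB : PySem.List.slice cs none (some (-1)) = cs.dropLast := PySem.List.slice_to_neg_one cs
  -- FirstMax of the prefix, built from okLine's data
  have hPlen : cs.dropLast.length = cs.length - 1 := by simp
  have hFMP : FirstMax cs.dropLast ((h : Nat) : Int) (cs.getD h ' ') := by
    refine ⟨h, rfl, by omega, by rw [getD_dropLast cs h (by omega)], hdig, ?_, ?_⟩
    · intro j hj hd
      rw [hPlen] at hj
      rw [getD_dropLast cs j hj] at hd ⊢
      exact hmax j (by omega) (by omega) hd
    · intro j hj hd
      rw [getD_dropLast cs j (by omega)] at hd ⊢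
      exact hfirst j hj hd
  have hMDP : maxDigit cs.dropLast = some (((h : Nat) : Int), cs.getD h ' ') := by
    rcases B_char cs.dropLast with ⟨hnone, hnd⟩ | ⟨i0, c0, hsome, hFM0⟩
    · exfalso
      have hmem : cs.dropLast.getD h ' ' ∈ cs.dropLast := by
        have h1 : h < cs.dropLast.length := by omega
        rw [List.getD_eq_getElem _ ' ' h1]; exact List.getElem_mem h1
      have := hnd _ hmem
      rw [getD_dropLast cs h (by omega), hdig] at this
      simp at this
    · obtain ⟨hie, hce⟩ := FirstMax_unique _ _ _ _ _ hFM0 hFMP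
      rw [hsome, hie, hce]
  -- the suffix
  have hS : PySem.List.slice cs (some (((h : Nat) : Int) + 1)) none = cs.drop (h + 1) := by
    have he : (((h : Nat) : Int) + 1) = ((h + 1 : Nat) : Int) := by push_cast; ring
    rw [he, PySem.List.slice_from_natCast]
  have hSdig : ∃ m c, maxDigit (cs.drop (h + 1)) = some (m, c) ∧ FirstMax (cs.drop (h + 1)) m c := by
    rcases B_char (cs.drop (h + 1)) with ⟨hnone, hnd⟩ | good
    · exfalso
      have hkm : (h + 1) + (k - (h + 1)) < cs.length := by omega
      have hmem : (cs.drop (h + 1)).getD (k - (h + 1)) ' ' ∈ cs.drop (h + 1) := by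
        have h1 : k - (h + 1) < (cs.drop (h + 1)).length := by simp; omega
        rw [List.getD_eq_getElem _ ' ' h1]; exact List.getElem_mem h1
      have := hnd _ hmem
      rw [getD_drop cs (h + 1) (k - (h + 1)) hkm] at this
      have hke : (h + 1) + (k - (h + 1)) = k := by omega
      rw [hke, hkdig] at this
      simp at this
    · exact good
  obtain ⟨m, d0, hMDS, hFMS⟩ := hSdig
  obtain ⟨mn, hmne, hmlen, hmch, hmdig, _, _⟩ := hFMS
  -- reduce the left-hand side
  rw [hPA, main_eq cs.dropLast, hMDP]
  simp only [Option.map_some]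
  try dsimp only
  rw [hS, main_eq (List.drop (h + 1) cs), hMDS]
  simp only [Option.map_some]
  try dsimp only
  have hget1 : PySem.List.pyGet? cs ((h : Nat) : Int) = some (cs.getD h ' ') := by
    rw [PySem.List.pyGet?_natCast]
    rw [List.getD_eq_getElem cs ' ' (by omega), List.getElem?_eq_getElem (by omega)]
  have hget2 : PySem.List.pyGet? (cs.drop (h + 1)) m = some d0 := by
    rw [hmne, PySem.List.pyGet?_natCast, List.getElem?_eq_getElem hmlen,
      ← List.getD_eq_getElem _ ' ' hmlen, hmch]
  rw [hget1, hget2]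
  simp only [Option.getD_some]
  rw [ofChars_digits _ _ hdig hmdig]
  simp only [Option.getD_some]
  -- reduce the right-hand side
  simp only [lineValue]
  rw [← hcs, hPB, hMDP]
  try dsimp only
  rw [hS, hMDS]

-- ===== VERDICT (by name: the statement is the Claim_ definition above) =====
theorem part_one_spec : Claim_equal_part_one := by
  unfold Claim_equal_part_one Spec_part_one
  intro lines _ hpre
  unfold part_one part_one_alt
  calc List.foldl _ 0 lines
      = List.foldl (fun (total : Int) line => total + lineValue line) 0 lines :=
        PySem.List.foldl_congr_mem _ _ _ _ (fun acc x hx => per_line acc x (hpre x hx))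
    _ = 0 + (lines.map lineValue).sum := PySem.List.foldl_add lines lineValue 0
    _ = (lines.map lineValue).sum := by simp
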